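-- pv_equiv track=rewrite | github.com/Nawigacja-PO-UMK/serwe | loadWays.py | is_steirs
-- ===== SOURCE A (Python) =====
-- def is_steirs(level):
--
--     levels=level.split("-")
--     if(len(levels)==1 or (levels[0]=="" and len(levels)==2)):
--        return None
--
--     level1=""
--     level2=False
--     pierwszy=True
--     tmp=""
--     for number in level:
--         if number!="-" or pierwszy or level2 :
--             tmp+=number
--         else:
--             level2=True
--             level1=tmp
--             tmp=""
--         pierwszy=False
--     level2=tmp
--     return [level1,level2]
-- ===== SOURCE B (Python) =====
-- def is_steirs(level):
--     levels = level.split("-")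
--     if len(levels) == 1 or (levels[0] == "" and len(levels) == 2):
--         return None
--     idx = level.index("-", 1)
--     return [level[:idx], level[idx + 1:]]
-- ===== Notes on version B (the rewrite author's own statement) =====
-- stated objective: simpler
-- what changed: The four-variable character-by-character state machine is replaced by a direct index('-', 1) search plus two slices; start=1 keeps A's rule that a dash in position 0 is a literal, and the split-based guard guarantees the searched dash exists.
import Mathlib
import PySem

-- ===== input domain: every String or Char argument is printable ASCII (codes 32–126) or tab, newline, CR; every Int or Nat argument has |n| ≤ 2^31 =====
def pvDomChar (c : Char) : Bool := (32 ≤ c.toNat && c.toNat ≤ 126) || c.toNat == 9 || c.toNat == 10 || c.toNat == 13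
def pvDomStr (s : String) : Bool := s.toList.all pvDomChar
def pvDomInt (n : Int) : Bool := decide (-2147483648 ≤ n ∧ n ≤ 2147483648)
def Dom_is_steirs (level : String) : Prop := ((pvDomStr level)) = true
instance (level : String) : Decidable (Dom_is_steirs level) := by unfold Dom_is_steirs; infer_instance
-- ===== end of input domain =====

-- B replaces A's four-variable character state machine by index('-', 1) plus two slices (simpler, same O(n)).

-- ===== PORT A =====
-- the body of A's for-loop, on state (level1, level2, pierwszy, tmp); level2 is the Bool phase flag
def isSteirsStep (st : List Char × Bool × Bool × List Char) (number : Char) :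
    List Char × Bool × Bool × List Char :=
  if number != '-' || st.2.2.1 || st.2.1 then
    (st.1, st.2.1, false, st.2.2.2 ++ [number])
  else
    (st.2.2.2, true, false, [])

def is_steirs (level : String) : Option (List String) :=
  let levels := (PySem.Str.split? level "-").getD []   -- sep "-" nonempty, so split? is always some
  -- levels[0]: split always returns a nonempty list, so headD is exact
  if levels.length == 1 || (levels.headD "" == "" && levels.length == 2) then none
  else
    let st := level.toList.foldl isSteirsStep ([], false, true, [])
    some [String.ofList st.1, String.ofList st.2.2.2]

-- ===== PORT B =====
def is_steirs_alt (level : String) : Option (List String) :=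
  let levels := (PySem.Str.split? level "-").getD []
  if levels.length == 1 || (levels.headD "" == "" && levels.length == 2) then none
  else
    -- level.index("-", 1): the guard guarantees a dash at index ≥ 1, so Python's index never raises
    let idx := PySem.Str.findFrom level "-" 1 none
    some [PySem.Str.slice level none (some idx), PySem.Str.slice level (some (idx + 1)) none]

-- ===== PRECONDITION & SPEC =====
def Spec_is_steirs (level : String) (out : Option (List String)) : Prop := out = is_steirs_alt level
instance (level : String) (out : Option (List String)) : Decidable (Spec_is_steirs level out) := by unfold Spec_is_steirs; infer_instance

-- ===== CLAIM (what is proved, stated in full; the proofs are below) =====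
def Claim_equal_is_steirs : Prop := ∀ (level : String), Dom_is_steirs level → Spec_is_steirs level (is_steirs level)

-- ===== LEMMAS AND PROOFS =====

-- first-occurrence decomposition of a list containing '-'
theorem pvMemSplit (t : List Char) (h : '-' ∈ t) :
    ∃ pre suf, t = pre ++ '-' :: suf ∧ '-' ∉ pre := by
  induction t with
  | nil => cases h
  | cons c rest ih =>
    by_cases hc : c = '-'
    · exact ⟨[], rest, by rw [hc]; rfl, by simp⟩
    · have h1 : '-' ∈ rest := by
        rcases List.mem_cons.mp h with h1 | h1
        · exact absurd h1.symm hc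
        · exact h1
      obtain ⟨pre, suf, he, hn⟩ := ih h1
      refine ⟨c :: pre, suf, by rw [he]; rfl, ?_⟩
      intro hm
      rcases List.mem_cons.mp hm with hm | hm
      · exact hc hm.symm
      · exact hn hm

theorem pvGoLength : ∀ (fuel : Nat) (l cur : List Char) (acc : List (List Char)),
    l.length ≤ fuel →
    (PySem.Chars.splitOn.go ['-'] fuel l cur acc).length = acc.length + 1 + l.count '-' := by
  intro fuel
  induction fuel with
  | zero =>
    intro l cur acc h
    have hl : l = [] := List.eq_nil_of_length_eq_zero (Nat.le_zero.mp h)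
    subst hl
    simp [PySem.Chars.splitOn.go]
  | succ f ih =>
    intro l cur acc h
    cases l with
    | nil => simp [PySem.Chars.splitOn.go]
    | cons c rest =>
      by_cases hc : c = '-'
      · subst hc
        have hrec := ih rest [] (cur.reverse :: acc) (by simpa using Nat.le_of_succ_le_succ h)
        simp [PySem.Chars.splitOn.go, List.isPrefixOf, hrec]
        omega
      · have hc' : ¬('-' = c) := fun h => hc h.symm
        have hrec := ih rest (c :: cur) acc (by simpa using Nat.le_of_succ_le_succ h)
        simp [PySem.Chars.splitOn.go, List.isPrefixOf, hc', hrec, List.count_cons]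
        omega

theorem pvSplitOnLength (s : List Char) :
    (PySem.Chars.splitOn s ['-']).length = s.count '-' + 1 := by
  have := pvGoLength (s.length + 1) s [] [] (Nat.le_succ _)
  simpa [PySem.Chars.splitOn, Nat.add_comm] using this

theorem pvGoHead : ∀ (fuel : Nat) (l cur : List Char) (acc : List (List Char)),
    ∃ r, PySem.Chars.splitOn.go ['-'] fuel l cur acc = acc.reverse ++ r := by
  intro fuel
  induction fuel with
  | zero =>
    intro l cur acc
    exact ⟨[cur.reverse ++ l], by simp [PySem.Chars.splitOn.go]⟩
  | succ f ih =>
    intro l cur acc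
    cases l with
    | nil => exact ⟨[cur.reverse], by simp [PySem.Chars.splitOn.go]⟩
    | cons c rest =>
      by_cases hc : c = '-'
      · subst hc
        obtain ⟨r, hr⟩ := ih rest [] (cur.reverse :: acc)
        refine ⟨[cur.reverse] ++ r, ?_⟩
        simp [PySem.Chars.splitOn.go, List.isPrefixOf, hr]
      · have hc' : ¬('-' = c) := fun h => hc h.symm
        obtain ⟨r, hr⟩ := ih rest (c :: cur) acc
        exact ⟨r, by simp [PySem.Chars.splitOn.go, List.isPrefixOf, hc', hr]⟩

theorem pvSplitOnDashHead (t : List Char) :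
    ∃ r, PySem.Chars.splitOn ('-' :: t) ['-'] = [] :: r := by
  obtain ⟨r, hr⟩ := pvGoHead (t.length + 1) t [] [[]]
  refine ⟨r, ?_⟩
  simp [PySem.Chars.splitOn, PySem.Chars.splitOn.go, List.isPrefixOf, hr]

theorem pvFindGo : ∀ (pre suf : List Char) (k : Nat), '-' ∉ pre →
    PySem.Chars.find.go ['-'] (pre ++ '-' :: suf) k = (k : Int) + pre.length := by
  intro pre
  induction pre with
  | nil => intro suf k _; simp [PySem.Chars.find.go, List.isPrefixOf]
  | cons c pre' ih =>
    intro suf k hn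
    have hc : c ≠ '-' := fun h => hn (by simp [h])
    have hn' : '-' ∉ pre' := fun h => hn (List.mem_cons_of_mem _ h)
    have hc' : ¬('-' = c) := fun h => hc h.symm
    have := ih suf (k + 1) hn'
    simp [PySem.Chars.find.go, List.isPrefixOf, hc', this]
    ring

theorem pvFindFirst (pre suf : List Char) (hn : '-' ∉ pre) :
    PySem.Chars.find (pre ++ '-' :: suf) ['-'] = (pre.length : Int) := by
  have := pvFindGo pre suf 0 hn
  simpa [PySem.Chars.find] using this

theorem pvFoldFlag : ∀ (l level1 tmp : List Char) (p : Bool),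
    ∃ p', List.foldl isSteirsStep (level1, true, p, tmp) l = (level1, true, p', tmp ++ l) := by
  intro l
  induction l with
  | nil => intro level1 tmp p; exact ⟨p, by simp⟩
  | cons c rest ih =>
    intro level1 tmp p
    obtain ⟨p', hp⟩ := ih level1 (tmp ++ [c]) false
    refine ⟨p', ?_⟩
    have hstep : isSteirsStep (level1, true, p, tmp) c = (level1, true, false, tmp ++ [c]) := by
      simp [isSteirsStep]
    rw [List.foldl_cons, hstep, hp]
    simp

theorem pvFoldSeek : ∀ (pre suf level1 tmp : List Char), '-' ∉ pre →
    ∃ p', List.foldl isSteirsStep (level1, false, false, tmp) (pre ++ '-' :: suf)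
      = (tmp ++ pre, true, p', suf) := by
  intro pre
  induction pre with
  | nil =>
    intro suf level1 tmp _
    obtain ⟨p', hp⟩ := pvFoldFlag suf tmp [] false
    refine ⟨p', ?_⟩
    have hstep : isSteirsStep (level1, false, false, tmp) '-' = (tmp, true, false, []) := by
      simp [isSteirsStep]
    rw [List.nil_append, List.foldl_cons, hstep, hp]
    simp
  | cons c pre' ih =>
    intro suf level1 tmp hn
    have hc : c ≠ '-' := fun h => hn (by simp [h])
    have hn' : '-' ∉ pre' := fun h => hn (List.mem_cons_of_mem _ h)
    obtain ⟨p', hp⟩ := ih suf level1 (tmp ++ [c]) hn'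
    refine ⟨p', ?_⟩
    have hstep : isSteirsStep (level1, false, false, tmp) c = (level1, false, false, tmp ++ [c]) := by
      simp [isSteirsStep, hc]
    rw [List.cons_append, List.foldl_cons, hstep, hp]
    simp

-- ===== VERDICT (by name: the statement is the Claim_ definition above) =====
theorem is_steirs_spec : Claim_equal_is_steirs := by
  intro level _
  unfold Spec_is_steirs is_steirs is_steirs_alt
  have hsplit : (PySem.Str.split? level "-").getD []
      = (PySem.Chars.splitOn level.toList ['-']).map String.ofList := by
    simp [PySem.Str.split?, PySem.Chars.split?]
  by_cases hc : (((PySem.Str.split? level "-").getD []).length == 1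
      || ((((PySem.Str.split? level "-").getD []).headD "" == "")
          && ((PySem.Str.split? level "-").getD []).length == 2)) = true
  · simp only [hc, if_true]
  · rw [Bool.not_eq_true] at hc
    simp only [hc, Bool.false_eq_true, if_false]
    rw [Bool.eq_false_iff] at hc
    rw [hsplit] at hc
    simp only [ne_eq, Bool.or_eq_true, Bool.and_eq_true, beq_iff_eq, not_or, not_and_or,
      List.length_map] at hc
    obtain ⟨hlen1, hcorner⟩ := hc
    have hcount : level.toList.count '-' ≠ 0 := by
      have := pvSplitOnLength level.toList
      intro h0
      apply hlen1
      omega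
    obtain ⟨c, t, hs⟩ : ∃ c t, level.toList = c :: t := by
      cases h : level.toList with
      | nil => exfalso; apply hcount; rw [h]; rfl
      | cons c t => exact ⟨c, t, rfl⟩
    have hmem : '-' ∈ t := by
      by_cases hcd : c = '-'
      · subst hcd
        obtain ⟨r, hr⟩ := pvSplitOnDashHead t
        have hhead : ((PySem.Chars.splitOn level.toList ['-']).map String.ofList).headD "" = "" := by
          rw [hs, hr]; rfl
        have hlen2 : (PySem.Chars.splitOn level.toList ['-']).length ≠ 2 := by
          rcases hcorner with h | h
          · exact absurd hhead h
          · exact h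
        have hL := pvSplitOnLength level.toList
        have hct : t.count '-' ≠ 0 := by
          rw [hs] at hL hlen2
          simp only [List.count_cons] at hL
          simp only [hL] at hlen2
          intro h0
          rw [h0] at hlen2
          simp at hlen2
        exact List.count_pos_iff.mp (Nat.pos_of_ne_zero hct)
      · have hm : '-' ∈ level.toList := List.count_pos_iff.mp (Nat.pos_of_ne_zero hcount)
        rw [hs] at hm
        rcases List.mem_cons.mp hm with h | h
        · exact absurd h.symm hcd
        · exact h
    obtain ⟨pre, suf, ht, hpre⟩ := pvMemSplit t hmem
    -- ===== A's side: the state machine ends in (c :: pre, true, _, suf)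
    have hstep : isSteirsStep ([], false, true, []) c = ([], false, false, [c]) := by
      simp [isSteirsStep]
    obtain ⟨p', hfold⟩ := pvFoldSeek pre suf [] [c] hpre
    have hA : level.toList.foldl isSteirsStep ([], false, true, []) = (c :: pre, true, p', suf) := by
      rw [hs, ht, List.foldl_cons, hstep, hfold]
      rfl
    -- ===== B's side: the searched index is 1 + pre.length
    have hlen : 1 ≤ level.toList.length := by rw [hs]; simp
    have hdash : "-".toList = ['-'] := rfl
    have hd1 : List.drop 1 level.toList = pre ++ '-' :: suf := by rw [hs, ht]; rfl
    have hff : PySem.Str.findFrom level "-" 1 none = ((pre.length + 1 : Nat) : Int) := by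
      rw [PySem.Str.findFrom_eq, hdash]
      have h := PySem.Chars.findFrom_natCast level.toList ['-'] 1 hlen
      rw [hd1, pvFindFirst pre suf hpre] at h
      have hne : ((pre.length : Int)) ≠ -1 := by omega
      rw [if_neg hne] at h
      rw [show ((1 : Nat) : Int) = (1 : Int) from rfl] at h
      rw [h]
      push_cast
      ring
    have hsplit1 : PySem.Str.slice level none (some (PySem.Str.findFrom level "-" 1 none))
        = String.ofList (c :: pre) := by
      rw [hff]
      simp only [PySem.Str.slice, PySem.Chars.slice]
      rw [PySem.List.slice_to_natCast]
      rw [show level.toList = (c :: pre) ++ ('-' :: suf) by rw [hs, ht]; rfl]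
      rw [show pre.length + 1 = (c :: pre).length by simp]
      rw [List.take_left]
    have hsplit2 : PySem.Str.slice level (some (PySem.Str.findFrom level "-" 1 none + 1)) none
        = String.ofList suf := by
      rw [hff]
      simp only [PySem.Str.slice, PySem.Chars.slice]
      rw [show ((pre.length + 1 : Nat) : Int) + 1 = ((pre.length + 2 : Nat) : Int) by push_cast; ring]
      rw [PySem.List.slice_from_natCast]
      rw [show level.toList = ((c :: pre) ++ ['-']) ++ suf by rw [hs, ht]; simp]
      rw [show pre.length + 2 = ((c :: pre) ++ ['-']).length by simp]
      rw [List.drop_left]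
    rw [hA, hsplit1, hsplit2]
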